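-- pv_equiv track=rewrite | github.com/jongmin1/Coding-Test | 완전탐색/programmers/모의고사.py | solution
-- ===== SOURCE A (Python) =====
-- n1 = [1, 2, 3, 4, 5]
--
-- n2 = [2, 1, 2, 3, 2, 4, 2, 5]
--
-- n3 = [3, 3, 1, 1, 2, 2, 4, 4, 5, 5]
--
-- def solution(answers):
--     answer = []
--     cnt = [0, 0, 0]
--     lenN1 = len(n1)
--     lenN2 = len(n2)
--     lenN3 = len(n3)
--     for i in range(len(answers)):
--         if n1[i%lenN1] == answers[i]:
--             cnt[0] += 1
--         if n2[i%lenN2] == answers[i]: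
--             cnt[1] += 1
--         if n3[i%lenN3] == answers[i]:
--             cnt[2] += 1
--
--     maxCnt = max(cnt)
--     for i in range(len(cnt)):
--         if cnt[i] == maxCnt:
--             answer.append(i+1)
--     answer.sort()
--     return answer
-- ===== SOURCE B (Python) =====
-- n1 = [1, 2, 3, 4, 5]
--
-- n2 = [2, 1, 2, 3, 2, 4, 2, 5]
--
-- n3 = [3, 3, 1, 1, 2, 2, 4, 4, 5, 5]
--
-- def solution(answers):
--     # All three patterns repeat with period 40 = lcm(5, 8, 10), so one pass
--     # builds a histogram keyed by (position mod 40, answer value); each score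
--     # is then read off the histogram with 40 constant-time lookups.
--     hist = {}
--     for i, a in enumerate(answers):
--         k = (i % 40, a)
--         hist[k] = hist.get(k, 0) + 1
--     cnt = [sum(hist.get((r, p[r % len(p)]), 0) for r in range(40)) for p in (n1, n2, n3)]
--     m = max(cnt)
--     return [j + 1 for j, c in enumerate(cnt) if c == m]
-- ===== Notes on version B (the rewrite author's own statement) =====
-- stated objective: alternative
-- what changed: Instead of A's fused loop that compares every answer against all three cyclic patterns and mutates three counters, B builds a histogram keyed by (index mod 40, answer) in one pattern-blind pass (40 = lcm of the pattern lengths) and then scores each pattern with 40 histogram lookups, independent of the number of answers; the argmax list is emitted ascending with no sort.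
import Mathlib
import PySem

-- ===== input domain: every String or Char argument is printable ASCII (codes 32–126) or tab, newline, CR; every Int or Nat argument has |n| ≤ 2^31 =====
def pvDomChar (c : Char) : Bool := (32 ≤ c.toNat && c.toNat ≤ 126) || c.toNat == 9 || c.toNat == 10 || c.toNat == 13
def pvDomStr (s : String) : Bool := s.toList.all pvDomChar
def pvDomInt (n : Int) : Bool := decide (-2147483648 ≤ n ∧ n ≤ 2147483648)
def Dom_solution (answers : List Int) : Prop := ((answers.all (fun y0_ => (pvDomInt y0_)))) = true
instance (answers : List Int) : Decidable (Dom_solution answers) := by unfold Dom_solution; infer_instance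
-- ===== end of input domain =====

-- B replaces A's fused three-counter scan with a one-pass (index mod 40, answer) histogram
-- (40 = lcm of the pattern lengths) scored by 40 lookups per pattern; objective: alternative.

-- ===== PORT A =====
def pvN1 : List Int := [1, 2, 3, 4, 5]
def pvN2 : List Int := [2, 1, 2, 3, 2, 4, 2, 5]
def pvN3 : List Int := [3, 3, 1, 1, 2, 2, 4, 4, 5, 5]

-- body of A's fused 'for i in range(len(answers))' loop: three sequential if-updates of cnt
-- (lenN1 = 5, lenN2 = 8, lenN3 = 10 are len(n1), len(n2), len(n3))
def pvStepA (answers : List Int) (cnt : List Int) (i : Int) : List Int :=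
  let cntA := if PySem.List.pyGetD pvN1 (PySem.Int.mod i 5) 0 = PySem.List.pyGetD answers i 0
              then PySem.List.pySetD cnt 0 (PySem.List.pyGetD cnt 0 0 + 1) else cnt
  let cntB := if PySem.List.pyGetD pvN2 (PySem.Int.mod i 8) 0 = PySem.List.pyGetD answers i 0
              then PySem.List.pySetD cntA 1 (PySem.List.pyGetD cntA 1 0 + 1) else cntA
  if PySem.List.pyGetD pvN3 (PySem.Int.mod i 10) 0 = PySem.List.pyGetD answers i 0
  then PySem.List.pySetD cntB 2 (PySem.List.pyGetD cntB 2 0 + 1) else cntB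

def solution (answers : List Int) : List Int :=
  let cnt := (PySem.List.pyRange 0 (answers.length : Int) 1).foldl (pvStepA answers) [0, 0, 0]
  let maxCnt := (PySem.List.max? cnt id).getD 0
  let answer := (PySem.List.pyRange 0 (cnt.length : Int) 1).foldl
    (fun acc i => if PySem.List.pyGetD cnt i 0 = maxCnt then acc ++ [i + 1] else acc) []
  PySem.List.sorted answer id

-- ===== PORT B =====
-- 'for i, a in enumerate(answers): k = (i % 40, a); hist[k] = hist.get(k, 0) + 1'
def pvHist (answers : List Int) : PySem.Dict (Int × Int) Int :=
  (PySem.List.enumerate answers 0).foldl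
    (fun d ia =>
      d.insert (PySem.Int.mod ia.1 40, ia.2) (d.getD (PySem.Int.mod ia.1 40, ia.2) 0 + 1))
    PySem.Dict.empty

-- 'sum(hist.get((r, p[r % len(p)]), 0) for r in range(40))'
def pvScore (hist : PySem.Dict (Int × Int) Int) (p : List Int) : Int :=
  (PySem.List.pyRange 0 40 1).foldl
    (fun s r => s + hist.getD (r, PySem.List.pyGetD p (PySem.Int.mod r (p.length : Int)) 0) 0) 0

def solution_alt (answers : List Int) : List Int :=
  let hist := pvHist answers
  let cnt := [pvN1, pvN2, pvN3].map (fun p => pvScore hist p)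
  let m := (PySem.List.max? cnt id).getD 0
  (PySem.List.enumerate cnt 0).foldl
    (fun acc jc => if jc.2 = m then acc ++ [jc.1 + 1] else acc) []

-- ===== PRECONDITION & SPEC =====
def Spec_solution (answers : List Int) (out : List Int) : Prop := out = solution_alt answers
instance (answers : List Int) (out : List Int) : Decidable (Spec_solution answers out) := by unfold Spec_solution; infer_instance

-- ===== CLAIM (what is proved, stated in full; the proofs are below) =====
def Claim_equal_solution : Prop := ∀ (answers : List Int), Dom_solution answers → Spec_solution answers (solution answers)


-- ===== LEMMAS AND PROOFS =====

-- A-side analysis helper: the per-element effect of A's loop on one counter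
def pvStepB (p : List Int) (s : Int) (ia : Int × Int) : Int :=
  if PySem.List.pyGetD p (PySem.Int.mod ia.1 (p.length : Int)) 0 = ia.2 then s + 1 else s

-- the Boolean match predicate shared by both analyses
def pvPred (p : List Int) (ia : Int × Int) : Bool :=
  PySem.List.pyGetD p (PySem.Int.mod ia.1 (p.length : Int)) 0 == ia.2

-- the key list B's histogram is built over
def pvKeys (answers : List Int) : List (Int × Int) :=
  (PySem.List.enumerate answers 0).map (fun ia => (PySem.Int.mod ia.1 40, ia.2))

lemma pvStepA_abc (answers : List Int) (a b c i : Int) :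
    pvStepA answers [a, b, c] i =
      [if PySem.List.pyGetD pvN1 (PySem.Int.mod i 5) 0 = PySem.List.pyGetD answers i 0 then a + 1 else a,
       if PySem.List.pyGetD pvN2 (PySem.Int.mod i 8) 0 = PySem.List.pyGetD answers i 0 then b + 1 else b,
       if PySem.List.pyGetD pvN3 (PySem.Int.mod i 10) 0 = PySem.List.pyGetD answers i 0 then c + 1 else c] := by
  unfold pvStepA
  split_ifs <;> rfl

-- A's fused loop computes, for each pattern, the enumerate-fold of pvStepB
lemma pvFused_loop (answers : List Int) :
    ∀ (xs : List Int) (k : Nat) (a b c : Int), answers.drop k = xs →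
      (PySem.List.pyRange (k : Int) ((k : Int) + (xs.length : Int)) 1).foldl (pvStepA answers) [a, b, c]
        = [(PySem.List.enumerate xs (k : Int)).foldl (pvStepB pvN1) a,
           (PySem.List.enumerate xs (k : Int)).foldl (pvStepB pvN2) b,
           (PySem.List.enumerate xs (k : Int)).foldl (pvStepB pvN3) c] := by
  intro xs
  induction xs with
  | nil =>
      intro k a b c _
      rw [PySem.List.pyRange_one_eq_nil (by simp)]
      simp [PySem.List.enumerate_nil]
  | cons x xs ih =>
      intro k a b c hdrop
      have hx : PySem.List.pyGetD answers (k : Int) 0 = x := by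
        rw [PySem.List.pyGetD_natCast]
        have h1 : answers[k + 0]? = some x := by
          rw [← List.getElem?_drop, hdrop]; rfl
        simp only [Nat.add_zero] at h1
        simp [List.getD, h1]
      have hdrop' : answers.drop (k + 1) = xs := by
        rw [← List.drop_drop, hdrop]; rfl
      rw [PySem.List.pyRange_one_cons (by simp [List.length_cons])]
      have hb : ((k : Int) + ((x :: xs).length : Int)) = (((k + 1 : Nat) : Int) + (xs.length : Int)) := by
        simp [List.length_cons]; ring
      rw [List.foldl_cons, pvStepA_abc, hb]
      have hkk : ((k : Int) + 1) = ((k + 1 : Nat) : Int) := by push_cast; ring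
      rw [hkk, ih (k + 1) _ _ _ hdrop']
      rw [PySem.List.enumerate_cons]
      simp only [List.foldl_cons, pvStepB, hx, ← hkk]
      norm_num [pvN1, pvN2, pvN3]

-- each pattern's enumerate-fold is a countP of the match predicate
lemma pvStepB_count (p : List Int) (l : List (Int × Int)) :
    l.foldl (pvStepB p) 0 = (l.countP (pvPred p) : Int) := by
  have he : pvStepB p = fun s ia => if pvPred p ia = true then s + 1 else s := by
    funext s ia
    simp [pvStepB, pvPred]
  rw [he, PySem.List.foldl_count_if]
  simp

-- B's histogram lookups are counts in the key list
lemma pvHist_getD (answers : List Int) (k : Int × Int) :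
    (pvHist answers).getD k 0 = ((pvKeys answers).count k : Int) := by
  unfold pvHist pvKeys
  have h := PySem.Dict.getD_foldl_insert_add_one
    ((PySem.List.enumerate answers 0).map (fun ia : Int × Int => (PySem.Int.mod ia.1 40, ia.2)))
    (PySem.Dict.empty (κ := Int × Int) (ν := Int)) k
  rw [List.foldl_map] at h
  simpa using h

-- summing one histogram row per residue counts the keys matching the row function
lemma pvSum_count (f : Int → Int) (ks : List (Int × Int))
    (hb : ∀ k ∈ ks, 0 ≤ k.1 ∧ k.1 < 40) :
    ((PySem.List.pyRange 0 40 1).map (fun r => ((ks.count (r, f r)) : Int))).sum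
      = (ks.countP (fun k => f k.1 == k.2) : Int) := by
  induction ks with
  | nil => simp
  | cons a ks ih =>
      have hba := hb a (List.mem_cons_self)
      have h1 : ∀ r : Int, (((a :: ks).count (r, f r)) : Int)
          = ((ks.count (r, f r)) : Int) + (if a == (r, f r) then 1 else 0) := by
        intro r; rw [List.count_cons]; push_cast; rfl
      have h2 : (fun r : Int => (a == (r, f r) : Bool)) = fun r : Int => ((r, f r) == a : Bool) := by
        funext r; simp [eq_comm]
      have hind : ((PySem.List.pyRange 0 40 1).map
            (fun r => if ((r, f r) == a : Bool) then (1 : Int) else 0)).sum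
          = if f a.1 == a.2 then 1 else 0 := by
        rw [PySem.List.sum_map_ite_one_zero]
        by_cases hfa : f a.1 = a.2
        · have hp : (fun r : Int => ((r, f r) == a : Bool)) = (fun r : Int => (r == a.1 : Bool)) := by
            funext r
            rcases a with ⟨a1, a2⟩
            by_cases hr : r = a1 <;> simp [Prod.ext_iff, hr, hfa]
          rw [hp]
          have hc : List.countP (fun r : Int => (r == a.1 : Bool)) (PySem.List.pyRange 0 40 1)
              = (PySem.List.pyRange 0 40 1).count a.1 := by simp [List.count]
          rw [hc, List.count_eq_one_of_mem (PySem.List.nodup_pyRange_one 0 40)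
                (by rw [PySem.List.mem_pyRange_one]; exact ⟨hba.1, hba.2⟩)]
          simp [hfa]
        · have hz : List.countP (fun r : Int => ((r, f r) == a : Bool)) (PySem.List.pyRange 0 40 1) = 0 := by
            rw [List.countP_eq_zero]
            intro r _
            rcases a with ⟨a1, a2⟩
            simp only [beq_iff_eq, Prod.ext_iff] at *
            rintro ⟨h1', h2'⟩
            exact hfa (by rw [h1'] at h2'; simpa using h2')
          rw [hz]
          simp [hfa]
      calc ((PySem.List.pyRange 0 40 1).map (fun r => (((a :: ks).count (r, f r)) : Int))).sum
          = ((PySem.List.pyRange 0 40 1).map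
              (fun r => ((ks.count (r, f r)) : Int) + (if a == (r, f r) then 1 else 0))).sum := by
            simp only [h1]
        _ = ((PySem.List.pyRange 0 40 1).map (fun r => ((ks.count (r, f r)) : Int))).sum
              + ((PySem.List.pyRange 0 40 1).map (fun r => if a == (r, f r) then (1 : Int) else 0)).sum := by
            rw [PySem.List.sum_map_add_int]
        _ = (ks.countP (fun k => f k.1 == k.2) : Int) + (if f a.1 == a.2 then 1 else 0) := by
            rw [ih (fun k hk => hb k (List.mem_cons_of_mem _ hk))]
            rw [show (fun r : Int => if a == (r, f r) then (1 : Int) else 0)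
                  = fun r : Int => if ((r, f r) == a : Bool) then (1 : Int) else 0 by
                funext r; rw [show (a == (r, f r) : Bool) = ((r, f r) == a : Bool) from congrFun h2 r]]
            rw [hind]
        _ = ((a :: ks).countP (fun k => f k.1 == k.2) : Int) := by
            rw [List.countP_cons]
            push_cast
            by_cases h : f a.1 = a.2 <;> simp [h]

-- residues compose: (i % 40) % L = i % L when L divides 40
lemma pvMod40 (i L : Int) (hL : 0 < L) (hd : L ∣ 40) :
    PySem.Int.mod (PySem.Int.mod i 40) L = PySem.Int.mod i L := by
  rw [PySem.Int.mod_eq_emod_of_pos (by norm_num : (0:Int) < 40),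
      PySem.Int.mod_eq_emod_of_pos hL, PySem.Int.mod_eq_emod_of_pos hL,
      Int.emod_emod_of_dvd _ hd]

-- B's score of a pattern (length dividing 40) is the countP of the match predicate
lemma pvScore_count (answers p : List Int) (hL : 0 < (p.length : Int)) (hd : (p.length : Int) ∣ 40) :
    pvScore (pvHist answers) p = ((PySem.List.enumerate answers 0).countP (pvPred p) : Int) := by
  unfold pvScore
  simp only [pvHist_getD]
  rw [PySem.List.foldl_add]
  rw [pvSum_count (fun r => PySem.List.pyGetD p (PySem.Int.mod r (p.length : Int)) 0)
        (pvKeys answers)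
        (by
          intro k hk
          unfold pvKeys at hk
          rcases List.mem_map.mp hk with ⟨ia, _, rfl⟩
          exact ⟨PySem.Int.mod_nonneg _ (by norm_num), PySem.Int.mod_lt _ (by norm_num)⟩)]
  unfold pvKeys
  rw [List.countP_map]
  have hmm : ∀ i : Int, PySem.Int.mod (PySem.Int.mod i 40) (p.length : Int) = PySem.Int.mod i (p.length : Int) :=
    fun i => pvMod40 i _ hL hd
  simp only [Function.comp_def, hmm]
  rw [zero_add]
  rfl

-- the tail of both programs: argmax emission over a 3-element count list
lemma pvFinal (v1 v2 v3 m : Int) :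
    PySem.List.sorted
        ((PySem.List.pyRange 0 (([v1, v2, v3] : List Int).length : Int) 1).foldl
          (fun acc i => if PySem.List.pyGetD [v1, v2, v3] i 0 = m then acc ++ [i + 1] else acc) []) id
      = (PySem.List.enumerate ([v1, v2, v3] : List Int) 0).foldl
          (fun acc ic => if ic.2 = m then acc ++ [ic.1 + 1] else acc) [] := by
  have hr : PySem.List.pyRange 0 (3 : Int) 1 = [0, 1, 2] := by decide
  have he : PySem.List.enumerate ([v1, v2, v3] : List Int) 0 = [(0, v1), (1, v2), (2, v3)] := by
    simp [PySem.List.enumerate_cons, PySem.List.enumerate_nil]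
  have hg0 : PySem.List.pyGetD ([v1, v2, v3] : List Int) 0 0 = v1 := rfl
  have hg1 : PySem.List.pyGetD ([v1, v2, v3] : List Int) 1 0 = v2 := rfl
  have hg2 : PySem.List.pyGetD ([v1, v2, v3] : List Int) 2 0 = v3 := rfl
  have hlen : ((([v1, v2, v3] : List Int).length : Nat) : Int) = 3 := by simp
  rw [hlen, hr, he]
  simp only [List.foldl_cons, List.foldl_nil, hg0, hg1, hg2]
  split_ifs <;> decide

-- ===== VERDICT (by name: the statement is the Claim_ definition above) =====
theorem solution_spec : Claim_equal_solution := by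
  intro answers _
  unfold Spec_solution solution solution_alt
  have h0 := pvFused_loop answers answers 0 0 0 0 (by simp)
  simp only [Nat.cast_zero, zero_add] at h0
  rw [h0]
  simp only [List.map_cons, List.map_nil]
  simp only [pvStepB_count, pvScore_count answers pvN1 (by norm_num [pvN1]) (by norm_num [pvN1]),
      pvScore_count answers pvN2 (by norm_num [pvN2]) (by norm_num [pvN2]),
      pvScore_count answers pvN3 (by norm_num [pvN3]) (by norm_num [pvN3])]
  exact pvFinal _ _ _ _
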